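-- pv_equiv track=rewrite | github.com/paiml/depyler | examples/hard_prac_fs_defrag.py | df_count_fragments
-- ===== SOURCE A (Python) =====
-- def df_count_fragments(disk: list[int], total: int) -> int:
--     """Count number of separate allocated fragments on disk.
--     A fragment is a contiguous run of non-zero blocks."""
--     frags: int = 0
--     in_alloc: int = 0
--     i: int = 0
--     while i < total:
--         b: int = disk[i]
--         if b != 0:
--             if in_alloc == 0:
--                 frags = frags + 1
--                 in_alloc = 1
--         else:
--             in_alloc = 0
--         i = i + 1
--     return frags
-- ===== SOURCE B (Python) =====
-- def df_count_fragments(disk: list[int], total: int) -> int: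
--     """Count contiguous runs of non-zero blocks among disk[0:total] by
--     inclusion-exclusion: each run of length L contributes L non-zero blocks
--     and L-1 adjacent non-zero pairs, so
--     #runs = #non-zero blocks - #adjacent pairs of non-zero blocks."""
--     nonzero = sum(1 for i in range(total) if disk[i] != 0)
--     pairs = sum(1 for i in range(1, total) if disk[i] != 0 and disk[i - 1] != 0)
--     return nonzero - pairs
-- ===== Notes on version B (the rewrite author's own statement) =====
-- stated objective: alternative
-- what changed: Replaced the while-loop state machine (frags counter plus in_alloc flag) with an inclusion-exclusion computation in two staged counting passes: number of non-zero blocks minus number of adjacent non-zero pairs, since a run of length L has L blocks and L-1 such pairs.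
import Mathlib
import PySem

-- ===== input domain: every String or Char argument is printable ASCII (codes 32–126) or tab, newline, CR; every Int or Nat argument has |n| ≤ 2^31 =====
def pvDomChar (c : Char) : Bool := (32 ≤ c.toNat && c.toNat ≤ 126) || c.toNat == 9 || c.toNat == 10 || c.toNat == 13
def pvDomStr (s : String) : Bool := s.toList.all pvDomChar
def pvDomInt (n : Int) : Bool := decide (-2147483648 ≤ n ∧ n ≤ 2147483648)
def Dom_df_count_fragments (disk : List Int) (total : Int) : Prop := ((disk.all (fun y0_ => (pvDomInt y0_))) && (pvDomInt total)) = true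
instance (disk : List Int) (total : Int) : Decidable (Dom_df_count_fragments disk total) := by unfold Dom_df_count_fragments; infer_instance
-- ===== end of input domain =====

-- B replaces A's while-loop state machine (frags + in_alloc flag) by inclusion-exclusion
-- in two staged counting passes: #non-zero blocks minus #adjacent non-zero pairs.

-- ===== PORT A =====
-- while i < total: b = disk[i]; if b != 0: (if in_alloc == 0: frags += 1; in_alloc = 1) else in_alloc = 0
def df_count_fragments (disk : List Int) (total : Int) : Int :=
  ((PySem.List.pyRange 0 total 1).foldl
    (fun (st : Int × Int) i =>
      let b := PySem.List.pyGetD disk i 0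
      if b ≠ 0 then
        (if st.2 == 0 then (st.1 + 1, (1 : Int)) else st)
      else
        (st.1, 0))
    (0, 0)).1

-- ===== PORT B =====
-- nonzero = sum(1 for i in range(total) if disk[i] != 0)
-- pairs   = sum(1 for i in range(1, total) if disk[i] != 0 and disk[i-1] != 0)
-- return nonzero - pairs
def df_count_fragments_alt (disk : List Int) (total : Int) : Int :=
  let nonzero : Int :=
    (PySem.List.pyRange 0 total 1).foldl
      (fun acc i => if PySem.List.pyGetD disk i 0 ≠ 0 then acc + 1 else acc) 0
  let pairs : Int :=
    (PySem.List.pyRange 1 total 1).foldl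
      (fun acc i => if PySem.List.pyGetD disk i 0 ≠ 0 ∧ PySem.List.pyGetD disk (i - 1) 0 ≠ 0
                    then acc + 1 else acc) 0
  nonzero - pairs

-- ===== PRECONDITION & SPEC =====
-- Pre_ excludes exactly the inputs where A (and B) raise IndexError: total > len(disk).
def Pre_df_count_fragments (disk : List Int) (total : Int) : Prop := total ≤ (disk.length : Int)
instance (disk : List Int) (total : Int) : Decidable (Pre_df_count_fragments disk total) := by unfold Pre_df_count_fragments; infer_instance
def pvWitness_df_count_fragments : List Int × Int := ([1, 0, 2, 2, 0], 5)

def Spec_df_count_fragments (disk : List Int) (total : Int) (out : Int) : Prop := out = df_count_fragments_alt disk total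
instance (disk : List Int) (total : Int) (out : Int) : Decidable (Spec_df_count_fragments disk total out) := by unfold Spec_df_count_fragments; infer_instance

-- ===== CLAIM (what is proved, stated in full; the proofs are below) =====
def Claim_equal_df_count_fragments : Prop := ∀ (disk : List Int) (total : Int), Dom_df_count_fragments disk total → Pre_df_count_fragments disk total → Spec_df_count_fragments disk total (df_count_fragments disk total)

-- ===== LEMMAS AND PROOFS =====

-- the step functions of the three folds
def dfStepA (disk : List Int) (st : Int × Int) (i : Int) : Int × Int :=
  let b := PySem.List.pyGetD disk i 0
  if b ≠ 0 then (if st.2 == 0 then (st.1 + 1, (1 : Int)) else st) else (st.1, 0)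

def dfStepZ (disk : List Int) (acc : Int) (i : Int) : Int :=
  if PySem.List.pyGetD disk i 0 ≠ 0 then acc + 1 else acc

def dfStepP (disk : List Int) (acc : Int) (i : Int) : Int :=
  if PySem.List.pyGetD disk i 0 ≠ 0 ∧ PySem.List.pyGetD disk (i - 1) 0 ≠ 0
  then acc + 1 else acc

-- invariant: after processing range(n), A's counter is (#non-zero) - (#adjacent pairs),
-- and A's flag records whether the previously processed block was non-zero
theorem dfMain (disk : List Int) (n : Nat) :
    (PySem.List.pyRange 0 n 1).foldl (dfStepA disk) (0, 0) =
      ((PySem.List.pyRange 0 n 1).foldl (dfStepZ disk) 0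
        - (PySem.List.pyRange 1 n 1).foldl (dfStepP disk) 0,
       if n = 0 then 0
       else if PySem.List.pyGetD disk ((n : Int) - 1) 0 ≠ 0 then 1 else 0) := by
  induction n with
  | zero => simp
  | succ m ih =>
      have hr0 : PySem.List.pyRange 0 ((m : Int) + 1) 1
          = PySem.List.pyRange 0 m 1 ++ [(m : Int)] :=
        PySem.List.pyRange_one_succ_right (by positivity)
      have hcast : ((m + 1 : Nat) : Int) = (m : Int) + 1 := by push_cast; ring
      rcases Nat.eq_zero_or_pos m with hm | hm
      · subst hm
        have hz : PySem.List.pyRange 1 (((0 : Nat) : Int) + 1) 1 = [] :=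
          PySem.List.pyRange_one_eq_nil (by norm_num)
        rw [hcast, hr0, hz]
        by_cases hb : PySem.List.pyGetD disk ((0 : Int)) 0 = 0 <;>
          simp [dfStepA, dfStepZ, hb]
      · have hm0 : m ≠ 0 := by omega
        have hm1 : (1 : Int) ≤ (m : Int) := by exact_mod_cast hm
        have hr1 : PySem.List.pyRange 1 ((m : Int) + 1) 1
            = PySem.List.pyRange 1 m 1 ++ [(m : Int)] :=
          PySem.List.pyRange_one_succ_right hm1
        rw [hcast, hr0, hr1, List.foldl_append, List.foldl_append, List.foldl_append, ih]
        simp only [hm0, if_false]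
        by_cases hprev : PySem.List.pyGetD disk ((m : Int) - 1) 0 = 0 <;>
          by_cases hb : PySem.List.pyGetD disk ((m : Int)) 0 = 0 <;>
            · simp only [PySem.List.pyGetD_natCast, List.getD_eq_getElem?_getD] at hb
              simp [dfStepA, dfStepZ, dfStepP, hprev, hb, hm0]
              try omega

-- ===== VERDICT (by name: the statement is the Claim_ definition above) =====
theorem df_count_fragments_spec : Claim_equal_df_count_fragments := by
  intro disk total _ _
  unfold Spec_df_count_fragments df_count_fragments df_count_fragments_alt
  by_cases h : total ≤ 0
  · rw [PySem.List.pyRange_one_eq_nil h, PySem.List.pyRange_one_eq_nil (by omega : total ≤ 1)]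
    simp
  · have h : 0 < total := by omega
    have htn : ((total.toNat : Nat) : Int) = total := Int.toNat_of_nonneg h.le
    rw [← htn]
    have hmain := congrArg Prod.fst (dfMain disk total.toNat)
    exact hmain
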